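-- pv_equiv track=rewrite | github.com/DunZane/Tiny-Zilean-Forge | utils/procession.py | process_continuous
-- ===== SOURCE A (Python) =====
-- def process_continuous(data):
--     # Process continuous data and return a list of lengths
--     length = 0
--     result = []
--     for _, _, val in data:
--         if val != 0:
--             length += 1
--         else:
--             if length > 0:
--                 result.extend([length] * length)
--                 length = 0
--             result.append(0)
--     if length > 0:
--         result.extend([length] * length)
--     return result
-- ===== SOURCE B (Python) =====
-- def process_continuous(data):
--     # Scan run by run: find the maximal block with the same (val != 0) key,
--     # emit [L]*L for a nonzero block of length L, [0]*L for a zero block.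
--     result = []
--     rest = data
--     while rest:
--         _, _, v = rest[0]
--         nz = v != 0
--         L = 0
--         while L < len(rest):
--             _, _, w = rest[L]
--             if (w != 0) != nz:
--                 break
--             L += 1
--         result.extend([L] * L if nz else [0] * L)
--         rest = rest[L:]
--     return result
-- ===== Notes on version B (the rewrite author's own statement) =====
-- stated objective: alternative
-- what changed: B scans the list run by run (maximal blocks of equal (val != 0) key) and emits each block's output wholesale, instead of A's element-wise pass with a running counter flushed at each zero and at the end.
import Mathlib
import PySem

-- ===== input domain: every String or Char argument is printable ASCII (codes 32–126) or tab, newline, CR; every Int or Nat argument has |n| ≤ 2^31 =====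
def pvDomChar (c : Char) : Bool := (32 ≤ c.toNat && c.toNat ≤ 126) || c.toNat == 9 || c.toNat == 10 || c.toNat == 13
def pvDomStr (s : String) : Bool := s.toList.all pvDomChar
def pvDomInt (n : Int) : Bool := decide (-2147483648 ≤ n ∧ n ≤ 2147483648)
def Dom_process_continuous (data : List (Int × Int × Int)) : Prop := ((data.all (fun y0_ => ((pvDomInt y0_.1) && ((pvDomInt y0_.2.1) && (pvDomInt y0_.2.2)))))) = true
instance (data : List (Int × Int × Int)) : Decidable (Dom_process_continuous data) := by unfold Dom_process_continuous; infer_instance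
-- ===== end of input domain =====

-- B replaces A's element-wise counter-and-flush pass by a run-by-run scan over
-- maximal blocks of equal (val != 0) key (objective: alternative decomposition).

-- ===== PORT A =====
-- the for-loop of A, state = (length, result)
def pcLoopA : List (Int × Int × Int) → Int → List Int → List Int
  | [], length, result =>
    if length > 0 then result ++ List.replicate length.toNat length else result
  | t :: rest, length, result =>
    if t.2.2 ≠ 0 then pcLoopA rest (length + 1) result
    else pcLoopA rest 0
      ((if length > 0 then result ++ List.replicate length.toNat length else result) ++ [0])

def process_continuous (data : List (Int × Int × Int)) : List Int :=
  pcLoopA data 0 []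

-- ===== PORT B =====
-- B's outer while-loop over the remaining suffix: the inner while counts the
-- maximal block sharing the head's (val != 0) key (= takeWhile), then the
-- block's output is emitted and the suffix advances past the block (= dropWhile).
def pcRunsB : List (Int × Int × Int) → List Int
  | [] => []
  | t :: rest =>
    let nz : Bool := decide (t.2.2 ≠ 0)
    let L : Nat := ((t :: rest).takeWhile (fun x => decide (x.2.2 ≠ 0) == nz)).length
    (if nz then List.replicate L (L : Int) else List.replicate L (0 : Int)) ++
      pcRunsB ((t :: rest).dropWhile (fun x => decide (x.2.2 ≠ 0) == nz))
termination_by l => l.length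
decreasing_by
  simp only [List.dropWhile_cons, BEq.rfl, if_pos]
  exact Nat.lt_succ_of_le (List.length_dropWhile_le _ _)

def process_continuous_alt (data : List (Int × Int × Int)) : List Int :=
  pcRunsB data

-- ===== PRECONDITION & SPEC =====
def Spec_process_continuous (data : List (Int × Int × Int)) (out : List Int) : Prop := out = process_continuous_alt data
instance (data : List (Int × Int × Int)) (out : List Int) : Decidable (Spec_process_continuous data out) := by unfold Spec_process_continuous; infer_instance

-- ===== CLAIM (what is proved, stated in full; the proofs are below) =====
def Claim_equal_process_continuous : Prop := ∀ (data : List (Int × Int × Int)), Dom_process_continuous data → Spec_process_continuous data (process_continuous data)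

-- ===== LEMMAS AND PROOFS =====

-- A's loop with the accumulator stripped, run-length as a Nat
def fSpec : List (Int × Int × Int) → Nat → List Int
  | [], k => List.replicate k (k : Int)
  | t :: rest, k =>
    if t.2.2 ≠ 0 then fSpec rest (k + 1)
    else List.replicate k (k : Int) ++ (0 :: fSpec rest 0)

theorem flush_eq (k : Nat) (acc : List Int) :
    (if (k : Int) > 0 then acc ++ List.replicate ((k : Int)).toNat ((k : Int)) else acc)
      = acc ++ List.replicate k ((k : Int)) := by
  cases k with
  | zero => simp
  | succ m => simp

theorem pcLoopA_eq_fSpec (data : List (Int × Int × Int)) :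
    ∀ (k : Nat) (acc : List Int), pcLoopA data (k : Int) acc = acc ++ fSpec data k := by
  induction data with
  | nil =>
    intro k acc
    show (if (k : Int) > 0 then acc ++ List.replicate ((k : Int)).toNat ((k : Int)) else acc)
        = acc ++ fSpec [] k
    rw [flush_eq]; rfl
  | cons t rest ih =>
    intro k acc
    by_cases h : t.2.2 ≠ 0
    · have h1 : pcLoopA (t :: rest) (k : Int) acc = pcLoopA rest ((k : Int) + 1) acc := by
        simp [pcLoopA, h]
      have h2 : ((k : Int) + 1) = ((k + 1 : Nat) : Int) := by push_cast; ring
      rw [h1, h2, ih]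
      simp [fSpec, h]
    · have ht : t.2.2 = 0 := not_not.mp h
      have h1 : pcLoopA (t :: rest) (k : Int) acc
          = pcLoopA rest ((0 : Nat) : Int)
              ((if (k : Int) > 0 then acc ++ List.replicate ((k : Int)).toNat ((k : Int)) else acc) ++ [0]) := by
        simp [pcLoopA, h]
      rw [h1, flush_eq, ih]
      simp [fSpec, ht, List.append_assoc]

theorem fSpec_nonzero_prefix (g : List (Int × Int × Int)) :
    ∀ (r : List (Int × Int × Int)) (k : Nat), (∀ t ∈ g, t.2.2 ≠ 0) →
      fSpec (g ++ r) k = fSpec r (k + g.length) := by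
  induction g with
  | nil => intro r k _; simp
  | cons t g ih =>
    intro r k hg
    have ht : t.2.2 ≠ 0 := hg t (by simp)
    have h1 : fSpec (g ++ r) (k + 1) = fSpec r (k + 1 + g.length) :=
      ih r (k + 1) (fun x hx => hg x (by simp [hx]))
    simp only [List.cons_append, fSpec, if_pos ht, h1, List.length_cons]
    ring_nf

theorem fSpec_zero_prefix (g : List (Int × Int × Int)) :
    ∀ (r : List (Int × Int × Int)), (∀ t ∈ g, t.2.2 = 0) →
      fSpec (g ++ r) 0 = List.replicate g.length (0 : Int) ++ fSpec r 0 := by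
  induction g with
  | nil => intro r _; simp
  | cons t g ih =>
    intro r hg
    have ht : t.2.2 = 0 := hg t (by simp)
    have h1 := ih r (fun x hx => hg x (by simp [hx]))
    simp [fSpec, ht, h1, List.replicate_succ]

theorem pcRunsB_eq_fSpec (n : Nat) :
    ∀ (data : List (Int × Int × Int)), data.length ≤ n → pcRunsB data = fSpec data 0 := by
  induction n with
  | zero =>
    intro data h
    have : data = [] := List.eq_nil_of_length_eq_zero (Nat.le_zero.mp h)
    subst this; simp [pcRunsB, fSpec]
  | succ n ih =>
    intro data h
    match data with
    | [] => simp [pcRunsB, fSpec]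
    | t :: rest =>
      rw [pcRunsB]
      by_cases ht : t.2.2 ≠ 0
      · -- nonzero run
        have hnz : decide (t.2.2 ≠ 0) = true := decide_eq_true ht
        rw [hnz]
        set p : (Int × Int × Int) → Bool := fun x => decide (x.2.2 ≠ 0) == true with hp
        have hpt : p t = true := by simp [hp, ht]
        have hsplit : (t :: rest).takeWhile p ++ (t :: rest).dropWhile p = t :: rest :=
          List.takeWhile_append_dropWhile
        have hdlen : ((t :: rest).dropWhile p).length ≤ n := by
          have : (t :: rest).dropWhile p = rest.dropWhile p := by
            simp [hpt]
          rw [this]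
          exact le_trans (List.length_dropWhile_le _ _) (Nat.succ_le_succ_iff.mp h)
        have hgnz : ∀ x ∈ (t :: rest).takeWhile p, x.2.2 ≠ 0 := by
          intro x hx
          have := List.mem_takeWhile_imp hx
          simpa [hp] using this
        have h1 := fSpec_nonzero_prefix ((t :: rest).takeWhile p) ((t :: rest).dropWhile p) 0 hgnz
        rw [hsplit, Nat.zero_add] at h1
        rw [h1]
        simp only [if_true]
        match hd : (t :: rest).dropWhile p with
        | [] => simp [pcRunsB, fSpec]
        | z :: rs =>
          have hz : z.2.2 = 0 := by
            have hhead := List.head_dropWhile_not p (l := t :: rest) (by simp [hd])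
            have hpz : p z = false := by simpa [hd] using hhead
            simpa [hp] using hpz
          have hlen2 : (z :: rs).length ≤ n := hd ▸ hdlen
          rw [ih _ hlen2]
          simp [fSpec, hz]
      · -- zero run
        have hz0 : t.2.2 = 0 := not_not.mp ht
        have hnz : decide (t.2.2 ≠ 0) = false := decide_eq_false ht
        rw [hnz]
        set p : (Int × Int × Int) → Bool := fun x => decide (x.2.2 ≠ 0) == false with hp
        have hpt : p t = true := by simp [hp, hz0]
        have hsplit : (t :: rest).takeWhile p ++ (t :: rest).dropWhile p = t :: rest :=
          List.takeWhile_append_dropWhile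
        have hdlen : ((t :: rest).dropWhile p).length ≤ n := by
          have : (t :: rest).dropWhile p = rest.dropWhile p := by
            simp [hpt]
          rw [this]
          exact le_trans (List.length_dropWhile_le _ _) (Nat.succ_le_succ_iff.mp h)
        have hgz : ∀ x ∈ (t :: rest).takeWhile p, x.2.2 = 0 := by
          intro x hx
          have := List.mem_takeWhile_imp hx
          simpa [hp] using this
        have h1 := fSpec_zero_prefix ((t :: rest).takeWhile p) ((t :: rest).dropWhile p) hgz
        rw [hsplit] at h1
        rw [h1, ih _ hdlen]
        simp

-- ===== VERDICT (by name: the statement is the Claim_ definition above) =====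
theorem process_continuous_spec : Claim_equal_process_continuous := by
  intro data _
  unfold Spec_process_continuous process_continuous process_continuous_alt
  have h1 := pcLoopA_eq_fSpec data 0 []
  have h2 := pcRunsB_eq_fSpec data.length data le_rfl
  simp only [Nat.cast_zero, List.nil_append] at h1
  rw [h1, h2]
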